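-- pv_equiv track=rewrite | github.com/JaredBears/Formation-Python | MoveNegatives.py | solution
-- ===== SOURCE A (Python) =====
-- def solution(array):
--     pref = []
--     suff = []
--     for num in array:
--         if num < 0:
--             pref.append(num)
--         else:
--             suff.append(num)
--     return pref + suff
-- ===== SOURCE B (Python) =====
-- def solution(array):
--     return sorted(array, key=lambda x: x >= 0)
-- ===== Notes on version B (the rewrite author's own statement) =====
-- stated objective: idiomatic
-- what changed: Replaced the two-accumulator partition loop with a single stable sort on the boolean key x >= 0, which sends negatives (False) first and preserves original order within each group.
import Mathlib
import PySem

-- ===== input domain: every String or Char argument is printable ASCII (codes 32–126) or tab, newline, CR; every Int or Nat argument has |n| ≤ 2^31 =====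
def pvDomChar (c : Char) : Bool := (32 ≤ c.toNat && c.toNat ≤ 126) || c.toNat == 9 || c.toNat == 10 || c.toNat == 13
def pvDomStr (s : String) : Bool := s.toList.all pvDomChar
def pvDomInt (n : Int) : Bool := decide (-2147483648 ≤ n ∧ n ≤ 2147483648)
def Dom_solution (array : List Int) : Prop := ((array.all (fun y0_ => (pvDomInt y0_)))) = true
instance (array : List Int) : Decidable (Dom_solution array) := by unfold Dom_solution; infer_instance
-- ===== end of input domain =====

-- B replaces A's two-accumulator partition loop by one stable sort on the boolean key x >= 0 (idiomatic; same return value).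

-- ===== PORT A =====
-- A: one loop appending each element to `pref` (negatives) or `suff` (others), then pref + suff.
def solution (array : List Int) : List Int :=
  let r := array.foldl
    (fun (st : List Int × List Int) num =>
      if num < 0 then (st.1 ++ [num], st.2) else (st.1, st.2 ++ [num]))
    ([], [])
  r.1 ++ r.2

-- ===== PORT B =====
-- B: sorted(array, key=lambda x: x >= 0) — stable sort, negatives (key False) first.
def solution_alt (array : List Int) : List Int :=
  PySem.List.sorted array (fun x => decide (0 ≤ x)) false

-- ===== PRECONDITION & SPEC =====
def Spec_solution (array : List Int) (out : List Int) : Prop := out = solution_alt array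
instance (array : List Int) (out : List Int) : Decidable (Spec_solution array out) := by unfold Spec_solution; infer_instance

-- ===== CLAIM (what is proved, stated in full; the proofs are below) =====
def Claim_equal_solution : Prop := ∀ (array : List Int), Dom_solution array → Spec_solution array (solution array)

-- ===== LEMMAS AND PROOFS =====

-- insertBy skips a prefix it never inserts before
theorem insertBy_append_of_forall_not {α : Type} (p : α → α → Bool) (x : α)
    (P S : List α) (hP : ∀ y ∈ P, p x y = false) :
    PySem.List.insertBy p x (P ++ S) = P ++ PySem.List.insertBy p x S := by
  induction P with
  | nil => simp
  | cons a t ih =>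
    have ha : p x a = false := hP a (by simp)
    simp [PySem.List.insertBy, ha, ih (fun y hy => hP y (by simp [hy]))]

-- inserting x before the head when the predicate fires
theorem insertBy_cons_of_before {α : Type} (p : α → α → Bool) (x s : α) (S : List α)
    (hs : p x s = true) :
    PySem.List.insertBy p x (s :: S) = x :: s :: S := by
  simp [PySem.List.insertBy, hs]

-- the loop invariant: with negatives P and non-negatives S already placed,
-- the insertion-sort fold equals A's partition fold
theorem partition_sort_invariant (array P S : List Int)
    (hP : ∀ y ∈ P, y < 0) (hS : ∀ y ∈ S, 0 ≤ y) :
    array.foldl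
      (fun acc x =>
        PySem.List.insertBy
          (fun a b => decide ((decide ((0:Int) ≤ a) : Bool) < (decide ((0:Int) ≤ b) : Bool))) x acc)
      (P ++ S)
    = (array.foldl
        (fun (st : List Int × List Int) num =>
          if num < 0 then (st.1 ++ [num], st.2) else (st.1, st.2 ++ [num]))
        (P, S)).1
      ++ (array.foldl
        (fun (st : List Int × List Int) num =>
          if num < 0 then (st.1 ++ [num], st.2) else (st.1, st.2 ++ [num]))
        (P, S)).2 := by
  induction array generalizing P S with
  | nil => simp
  | cons x t ih =>
    by_cases hx : x < 0
    · have hstep : PySem.List.insertBy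
          (fun a b => decide ((decide ((0:Int) ≤ a) : Bool) < (decide ((0:Int) ≤ b) : Bool))) x (P ++ S)
          = (P ++ [x]) ++ S := by
        have hPf : ∀ y ∈ P, (decide ((decide ((0:Int) ≤ x) : Bool) < (decide ((0:Int) ≤ y) : Bool)) : Bool) = false := by
          intro y hy
          have := hP y hy
          simp [show ¬ (0:Int) ≤ y by omega]
        rw [insertBy_append_of_forall_not _ _ _ _ hPf]
        cases S with
        | nil =>
          rw [PySem.List.insertBy_of_forall_not_before _ _ _ (by simp)]
          simp
        | cons s S' =>
          have hs0 : (0:Int) ≤ s := hS s (by simp)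
          rw [insertBy_cons_of_before _ _ _ _ (by simp [show ¬ (0:Int) ≤ x by omega, hs0])]
          simp
      simp only [List.foldl_cons, if_pos hx, hstep]
      exact ih (P ++ [x]) S
        (by intro y hy; rcases List.mem_append.mp hy with h | h
            · exact hP y h
            · simp at h; omega) hS
    · have hx0 : (0:Int) ≤ x := by omega
      have hstep : PySem.List.insertBy
          (fun a b => decide ((decide ((0:Int) ≤ a) : Bool) < (decide ((0:Int) ≤ b) : Bool))) x (P ++ S)
          = P ++ (S ++ [x]) := by
        rw [PySem.List.insertBy_of_forall_not_before _ _ _ (by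
          intro y _
          simp [hx0, Bool.lt_iff])]
        simp
      simp only [List.foldl_cons, if_neg hx, hstep]
      exact ih P (S ++ [x]) hP
        (by intro y hy; rcases List.mem_append.mp hy with h | h
            · exact hS y h
            · simp at h; omega)

-- ===== VERDICT (by name: the statement is the Claim_ definition above) =====
theorem solution_spec : Claim_equal_solution := by
  intro array _
  unfold Spec_solution solution solution_alt
  rw [PySem.List.sorted_eq_foldl_insertBy]
  exact (partition_sort_invariant array [] [] (by simp) (by simp)).symm
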